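-- pv_equiv track=rewrite | github.com/amanpan1216/E-cursor | Strip/automation_suite/solvers/three_ds.py | _is_challenge_page
-- ===== SOURCE A (Python) =====
-- def _is_challenge_page(html: str) -> bool:
--     challenge_indicators = [
--         'password',
--         'otp',
--         'verification',
--         'authenticate',
--         'confirm',
--         'enter code',
--         'security code'
--     ]
--
--     html_lower = html.lower()
--     return any(indicator in html_lower for indicator in challenge_indicators)
-- ===== SOURCE B (Python) =====
-- import re
--
-- _CHALLENGE_RE = re.compile(
--     'password|otp|verification|authenticate|confirm|enter code|security code'
-- )
--
--
-- def _is_challenge_page(html: str) -> bool: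
--     return _CHALLENGE_RE.search(html.lower()) is not None
-- ===== Notes on version B (the rewrite author's own statement) =====
-- stated objective: idiomatic
-- what changed: B replaces A's seven independent substring-containment scans with one compiled regex that alternates the seven literal indicators and does a single search pass over the lowered text.
import Mathlib
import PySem

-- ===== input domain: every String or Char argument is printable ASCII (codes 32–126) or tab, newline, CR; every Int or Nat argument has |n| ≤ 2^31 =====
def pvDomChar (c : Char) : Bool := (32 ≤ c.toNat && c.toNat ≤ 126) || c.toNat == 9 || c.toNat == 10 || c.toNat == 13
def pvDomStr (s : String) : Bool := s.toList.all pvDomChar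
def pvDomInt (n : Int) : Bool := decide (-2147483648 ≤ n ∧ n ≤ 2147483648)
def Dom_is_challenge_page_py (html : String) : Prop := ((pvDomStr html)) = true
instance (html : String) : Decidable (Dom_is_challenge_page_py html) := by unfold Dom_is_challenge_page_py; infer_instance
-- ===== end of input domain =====

-- B replaces A's seven independent substring scans with one compiled regex that alternates
-- the seven literal indicators and searches the lowered text once (idiomatic).

-- ===== PORT A =====
-- literal port of A: the indicator list, html.lower(), any('indicator in html_lower').
def is_challenge_page_py (html : String) : Bool :=
  let challenge_indicators : List String :=
    ["password", "otp", "verification", "authenticate", "confirm", "enter code", "security code"]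
  let html_lower := PySem.Str.lower html
  challenge_indicators.any (fun indicator => PySem.Str.isIn indicator html_lower)

-- ===== PORT B =====
-- port of Source B: _CHALLENGE_RE.search(html.lower()) is not None.  The pattern is a pure
-- alternation of seven literal strings (no metacharacters), so re.search succeeds exactly
-- when, at some start position of the text, one of the alternatives begins there; this hand
-- port of the library call is exact for this literal-alternation pattern: it tries each
-- position of the lowered text in turn and, at each, the alternatives in pattern order.
def is_challenge_page_py_alt (html : String) : Bool :=
  let alts : List (List Char) :=
    ["password".toList, "otp".toList, "verification".toList, "authenticate".toList,
     "confirm".toList, "enter code".toList, "security code".toList]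
  let h := PySem.Chars.lower html.toList
  (List.range (h.length + 1)).any (fun i => alts.any (fun a => a.isPrefixOf (h.drop i)))

-- ===== PRECONDITION & SPEC =====
def Spec_is_challenge_page_py (html : String) (out : Bool) : Prop := out = is_challenge_page_py_alt html
instance (html : String) (out : Bool) : Decidable (Spec_is_challenge_page_py html out) := by unfold Spec_is_challenge_page_py; infer_instance

-- ===== CLAIM (what is proved, stated in full; the proofs are below) =====
def Claim_equal_is_challenge_page_py : Prop := ∀ (html : String), Dom_is_challenge_page_py html → Spec_is_challenge_page_py html (is_challenge_page_py html)

-- ===== LEMMAS AND PROOFS =====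

-- B's position scan for a single needle equals Python's 'needle in haystack'.
theorem scan_eq_isIn (a cs : List Char) :
    ((List.range (cs.length + 1)).any (fun i => a.isPrefixOf (cs.drop i)))
      = PySem.Chars.isIn a cs := by
  rw [Bool.eq_iff_iff, ← PySem.Chars.exists_prefix_drop_iff_isIn]
  simp only [List.any_eq_true, List.mem_range, List.isPrefixOf_iff_prefix]
  constructor
  · rintro ⟨i, -, h⟩; exact ⟨i, h⟩
  · rintro ⟨j, hj⟩
    refine ⟨min j cs.length, by omega, ?_⟩
    rcases le_total j cs.length with h | h
    · simpa [min_eq_left h] using hj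
    · have hd : cs.drop j = [] := List.drop_eq_nil_of_le h
      rw [hd, List.prefix_nil] at hj
      simp [min_eq_right h, List.drop_length, hj]

-- Swap the two 'any's: B's one pass over positions = one containment test per needle.
theorem scan_alts (alts : List (List Char)) (cs : List Char) :
    ((List.range (cs.length + 1)).any (fun i => alts.any (fun a => a.isPrefixOf (cs.drop i))))
      = alts.any (fun a => PySem.Chars.isIn a cs) := by
  rw [Bool.eq_iff_iff]
  simp only [← scan_eq_isIn, List.any_eq_true, List.mem_range]
  tauto

-- ===== VERDICT (by name: the statement is the Claim_ definition above) =====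
theorem is_challenge_page_py_spec : Claim_equal_is_challenge_page_py := by
  intro html _
  unfold Spec_is_challenge_page_py is_challenge_page_py is_challenge_page_py_alt
  rw [scan_alts]
  simp [PySem.Str.isIn, PySem.Str.lower]
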